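-- pv_equiv track=rewrite | github.com/nirajpatil2005/MEDINTEL | backend/offline_extractor.py | _detect_column_boundaries
-- ===== SOURCE A (Python) =====
-- def _detect_column_boundaries(header_line: str) -> list[tuple[int, int]]:
--     """
--     Detect column boundaries from a fixed-width header line by finding
--     runs of non-space characters separated by 2+ spaces.
--
--     Returns list of (start, end) character positions for each column.
--     """
--     boundaries: list[tuple[int, int]] = []
--     i = 0
--     length = len(header_line)
--
--     while i < length:
--         # Skip leading spaces
--         while i < length and header_line[i] == " ":
--             i += 1
--         if i >= length:
--             break
--
--         start = i
--
--         # Consume non-space characters (and single spaces within column names)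
--         while i < length:
--             if header_line[i] != " ":
--                 i += 1
--             elif i + 1 < length and header_line[i + 1] != " ":
--                 # Single space — part of the column name (e.g., "NEAR EXP.")
--                 i += 1
--             else:
--                 break
--
--         end = i
--         if end > start:
--             boundaries.append((start, end))
--
--     return boundaries
-- ===== SOURCE B (Python) =====
-- def _detect_column_boundaries(header_line: str) -> list[tuple[int, int]]:
--     # Alternative decomposition: classify each position as column content
--     # (non-space, or a single space flanked by non-spaces), then read the
--     # maximal runs of the mask off as (start, end) pairs via comprehensions.
--     n = len(header_line)
--     tok = [c != " " or (0 < i < n - 1 and header_line[i - 1] != " " and header_line[i + 1] != " ")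
--            for i, c in enumerate(header_line)]
--     starts = [i for i in range(n) if tok[i] and (i == 0 or not tok[i - 1])]
--     ends = [i + 1 for i in range(n) if tok[i] and (i == n - 1 or not tok[i + 1])]
--     return list(zip(starts, ends))
-- ===== Notes on version B (the rewrite author's own statement) =====
-- stated objective: alternative
-- what changed: Replaces A's nested while-loop state machine (skip spaces, then consume a column, tracking start/end indices) by a declarative three-pass formulation: a per-position boolean mask marking column content (non-space, or a single space flanked by non-spaces), then comprehensions reading the mask's run starts and run ends, zipped into the result.
import Mathlib
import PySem

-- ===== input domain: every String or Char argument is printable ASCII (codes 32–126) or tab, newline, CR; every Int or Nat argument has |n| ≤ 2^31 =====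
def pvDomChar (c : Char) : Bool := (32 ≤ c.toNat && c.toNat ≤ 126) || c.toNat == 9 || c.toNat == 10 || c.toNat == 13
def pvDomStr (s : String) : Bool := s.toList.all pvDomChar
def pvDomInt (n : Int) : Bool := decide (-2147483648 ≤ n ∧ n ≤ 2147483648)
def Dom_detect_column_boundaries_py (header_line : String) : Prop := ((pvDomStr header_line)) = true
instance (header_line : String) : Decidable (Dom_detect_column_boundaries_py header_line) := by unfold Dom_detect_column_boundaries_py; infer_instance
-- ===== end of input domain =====

-- B replaces A's nested while-loop state machine by a per-position boolean mask
-- plus comprehensions reading off the maximal runs (objective: alternative, same cost).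

-- ===== PORT A =====
-- A's inner "skip leading spaces" while-loop.  All indexing is in range, so
-- List.getD is exact for Python's header_line[i].
def skipA (s : List Char) (i : Nat) : Nat :=
  if h : i < s.length ∧ s.getD i ' ' = ' ' then skipA s (i + 1) else i
termination_by s.length - i
decreasing_by omega

-- A's inner "consume column characters" while-loop, branches in source order.
def consA (s : List Char) (i : Nat) : Nat :=
  if _h : i < s.length then
    if s.getD i ' ' ≠ ' ' then consA s (i + 1)
    else if i + 1 < s.length ∧ s.getD (i + 1) ' ' ≠ ' ' then consA s (i + 1)
    else i
  else i
termination_by s.length - i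
decreasing_by all_goals omega

-- facts the outer loop's termination needs (cited by name in decreasing_by)
theorem skipA_ge (s : List Char) (i : Nat) : i ≤ skipA s i := by
  fun_induction skipA s i with
  | case1 i h ih => omega
  | case2 i h => omega

theorem skipA_stop (s : List Char) (i : Nat) :
    skipA s i < s.length → s.getD (skipA s i) ' ' ≠ ' ' := by
  fun_induction skipA s i with
  | case1 i h ih => exact ih
  | case2 i h => intro h1 h2; exact h ⟨h1, h2⟩

theorem consA_ge (s : List Char) (i : Nat) : i ≤ consA s i := by
  fun_induction consA s i <;> omega

theorem consA_gt (s : List Char) (i : Nat) (h : i < s.length)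
    (hne : s.getD i ' ' ≠ ' ') : i < consA s i := by
  rw [consA]
  simp only [dif_pos h, if_pos hne]
  have := consA_ge s (i + 1)
  omega

-- A's outer while-loop; `boundaries` is the accumulator `acc`.
def outerA (s : List Char) (i : Nat) (acc : List (Int × Int)) : List (Int × Int) :=
  if h : i < s.length then
    let start := skipA s i
    if h2 : s.length ≤ start then acc
    else
      let e := consA s start
      outerA s e (if start < e then acc ++ [((start : Int), (e : Int))] else acc)
  else acc
termination_by s.length - i
decreasing_by
  have h1 := skipA_ge s i
  have h3 := consA_gt s (skipA s i) (by omega) (skipA_stop s i (by omega))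
  omega

def detect_column_boundaries_py (header_line : String) : List (Int × Int) :=
  outerA header_line.toList 0 []

-- ===== PORT B =====
-- tok[i] of Source B: position i is column content
def tokB (s : List Char) (i : Nat) : Bool :=
  (s.getD i ' ' != ' ') ||
    (decide (0 < i) && decide (i + 1 < s.length) &&
      (s.getD (i - 1) ' ' != ' ') && (s.getD (i + 1) ' ' != ' '))

def detect_column_boundaries_py_alt (header_line : String) : List (Int × Int) :=
  let s := header_line.toList
  let n := s.length
  let tok := (List.range n).map (fun i => tokB s i)
  let starts := (List.range n).filter
    (fun i => tok.getD i false && (i == 0 || !(tok.getD (i - 1) false)))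
  let ends := ((List.range n).filter
    (fun i => tok.getD i false && (i == n - 1 || !(tok.getD (i + 1) false)))).map (fun i => (i + 1 : Nat))
  (starts.zip ends).map (fun p => ((p.1 : Int), (p.2 : Int)))

-- ===== PRECONDITION & SPEC =====
def Spec_detect_column_boundaries_py (header_line : String) (out : List (Int × Int)) : Prop := out = detect_column_boundaries_py_alt header_line
instance (header_line : String) (out : List (Int × Int)) : Decidable (Spec_detect_column_boundaries_py header_line out) := by unfold Spec_detect_column_boundaries_py; infer_instance

-- ===== CLAIM (what is proved, stated in full; the proofs are below) =====
def Claim_equal_detect_column_boundaries_py : Prop := ∀ (header_line : String), Dom_detect_column_boundaries_py header_line → Spec_detect_column_boundaries_py header_line (detect_column_boundaries_py header_line)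

-- ===== LEMMAS AND PROOFS =====

-- run-start / run-end predicates of the mask, as B's filters compute them
def runstartB (s : List Char) (k : Nat) : Bool :=
  tokB s k && (k == 0 || !tokB s (k - 1))
def runendB (s : List Char) (k : Nat) : Bool :=
  tokB s k && (k + 1 == s.length || !tokB s (k + 1))

-- B's result restricted to positions ≥ i
def colsFrom (s : List Char) (i : Nat) : List (Int × Int) :=
  ((((List.range' i (s.length - i)).filter (runstartB s))).zip
    (((List.range' i (s.length - i)).filter (runendB s)).map (fun k => (k + 1 : Nat)))).map
    (fun p => ((p.1 : Int), (p.2 : Int)))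

theorem tokB_of_ge (s : List Char) (k : Nat) (h : s.length ≤ k) : tokB s k = false := by
  simp [tokB]
  refine ⟨?_, ?_⟩
  · rw [List.getElem?_eq_none (by omega)]; rfl
  · intro _ h2 _; omega

theorem tokB_of_ne (s : List Char) (k : Nat) (h : s.getD k ' ' ≠ ' ') : tokB s k = true := by
  simp only [List.getD_eq_getElem?_getD] at h
  simp [tokB]
  exact Or.inl h

theorem tokB_false_of (s : List Char) (k : Nat) (h1 : s.getD k ' ' = ' ')
    (h2 : k + 1 < s.length → s.getD (k + 1) ' ' = ' ') : tokB s k = false := by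
  simp only [List.getD_eq_getElem?_getD] at h1 h2
  simp [tokB]
  exact ⟨h1, fun _ hlt _ => h2 hlt⟩

theorem skipA_spaces (s : List Char) (i : Nat) :
    ∀ k, i ≤ k → k < skipA s i → s.getD k ' ' = ' ' := by
  fun_induction skipA s i with
  | case1 i h ih =>
    intro k hk hk2
    rcases Nat.eq_or_lt_of_le hk with rfl | hk'
    · exact h.2
    · exact ih k hk' hk2
  | case2 i h => intro k hk hk2; omega

theorem consA_le (s : List Char) (i : Nat) (h : i ≤ s.length) : consA s i ≤ s.length := by
  fun_induction consA s i with
  | case1 i h1 h2 ih => exact ih (by omega)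
  | case2 i h1 h2 h3 ih => exact ih (by omega)
  | case3 i h1 h2 h3 => omega
  | case4 i h1 => exact h

theorem consA_stop (s : List Char) (i : Nat) :
    consA s i < s.length →
      s.getD (consA s i) ' ' = ' ' ∧
        (consA s i + 1 < s.length → s.getD (consA s i + 1) ' ' = ' ') := by
  fun_induction consA s i with
  | case1 i h1 h2 ih => exact ih
  | case2 i h1 h2 h3 ih => exact ih
  | case3 i h1 h2 h3 =>
    intro _
    rw [not_not] at h2
    refine ⟨h2, fun hlt => ?_⟩
    by_contra hne
    exact h3 ⟨hlt, hne⟩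
  | case4 i h1 => intro h; omega

-- consA stays inside the mask: every position it passes over is tok
theorem consA_tok (s : List Char) (i : Nat) :
    tokB s i = true → ∀ k, i ≤ k → k < consA s i → tokB s k = true := by
  fun_induction consA s i with
  | case1 i h1 h2 ih =>
    intro hT k hk hk2
    rcases Nat.eq_or_lt_of_le hk with rfl | hk'
    · exact hT
    · -- need tok (i+1) to feed the IH
      by_cases hc : i + 1 < consA s (i + 1)
      · have hT1 : tokB s (i + 1) = true := by
          by_cases hsp : s.getD (i + 1) ' ' = ' '
          · -- consA continued past the space i+1, so i+2 is in range and non-space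
            rw [consA] at hc
            by_cases hl : i + 1 < s.length
            · simp only [dif_pos hl] at hc
              rw [if_neg (by simpa using hsp)] at hc
              by_cases hc2 : i + 1 + 1 < s.length ∧ s.getD (i + 1 + 1) ' ' ≠ ' '
              · have hprev : s.getD (i + 1 - 1) ' ' ≠ ' ' := by simpa using h2
                simp only [List.getD_eq_getElem?_getD] at hprev
                have hnext : s.getD (i + 1 + 1) ' ' ≠ ' ' := hc2.2
                simp only [List.getD_eq_getElem?_getD] at hnext
                simp [tokB, hc2.1]
                refine Or.inr ⟨hprev, ?_⟩
                intro hEq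
                apply hnext
                rw [List.getElem?_eq_getElem hc2.1]
                simpa using hEq
              · rw [if_neg hc2] at hc; omega
            · simp only [dif_neg hl] at hc; omega
          · exact tokB_of_ne s (i + 1) hsp
        exact ih hT1 k hk' hk2
      · omega
  | case2 i h1 h2 h3 ih =>
    intro hT k hk hk2
    rcases Nat.eq_or_lt_of_le hk with rfl | hk'
    · exact hT
    · have hT1 : tokB s (i + 1) = true := tokB_of_ne s (i + 1) h3.2
      exact ih hT1 k hk' hk2
  | case3 i h1 h2 h3 => intro hT k hk hk2; omega
  | case4 i h1 => intro hT k hk hk2; omega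

-- the loop invariant of A's outer loop: at entry i is 0, past the end, or a
-- break position (a space followed by a space or the end)
def InvA (s : List Char) (i : Nat) : Prop :=
  i = 0 ∨ s.length ≤ i ∨
    (s.getD i ' ' = ' ' ∧ (i + 1 < s.length → s.getD (i + 1) ' ' = ' '))

-- spaces skipped by A's first inner loop are not tok
theorem skipA_id (s : List Char) (i : Nat) (h : s.length ≤ i) : skipA s i = i := by
  rw [skipA]
  rw [dif_neg (by omega)]

theorem skipped_not_tok (s : List Char) (i : Nat) (hInv : InvA s i) :
    ∀ k, i ≤ k → k < skipA s i → tokB s k = false := by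
  intro k hk hk2
  have hsp : s.getD k ' ' = ' ' := skipA_spaces s i k hk hk2
  simp only [List.getD_eq_getElem?_getD] at hsp
  simp [tokB]
  refine ⟨hsp, ?_⟩
  intro hk0 hk1 hprev
  by_cases hlt : k + 1 < skipA s i
  · simpa only [List.getD_eq_getElem?_getD] using skipA_spaces s i (k + 1) (by omega) hlt
  · -- k + 1 = skipA s i
    rcases Nat.eq_or_lt_of_le hk with rfl | hk'
    · -- k = i : use the invariant
      rcases hInv with rfl | h | ⟨_, h2⟩
      · omega
      · have := skipA_id s i h; omega
      · simpa only [List.getD_eq_getElem?_getD] using h2 hk1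
    · -- k > i : k - 1 is also a skipped space
      have := skipA_spaces s i (k - 1) (by omega) (by omega)
      simp only [List.getD_eq_getElem?_getD] at this
      exact absurd this hprev

theorem all_space_not_tok (s : List Char) (i : Nat)
    (h : ∀ j, i ≤ j → j < s.length → s.getD j ' ' = ' ') :
    ∀ k, i ≤ k → runstartB s k = false := by
  intro k hk
  by_cases hkn : k < s.length
  · have : tokB s k = false :=
      tokB_false_of s k (h k hk hkn) (fun hlt => h (k + 1) (by omega) hlt)
    simp [runstartB, this]
  · simp [runstartB, tokB_of_ge s k (by omega)]

theorem colsFrom_nil (s : List Char) (i : Nat)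
    (h : ∀ j, i ≤ j → j < s.length → s.getD j ' ' = ' ') : colsFrom s i = [] := by
  unfold colsFrom
  have : (List.range' i (s.length - i)).filter (runstartB s) = [] := by
    rw [List.filter_eq_nil_iff]
    intro a ha
    rw [List.mem_range'_1] at ha
    simp [all_space_not_tok s i h a ha.1]
  rw [this]
  simp

-- splitting a range' at two interior points
theorem range'_split (a b c : Nat) (h1 : a ≤ b) (h2 : b ≤ c) :
    List.range' a (c - a) = List.range' a (b - a) ++ List.range' b (c - b) := by
  have := @List.range'_append a (b - a) (c - b) 1
  simp only [Nat.one_mul] at this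
  rw [show a + (b - a) = b by omega] at this
  rw [show b - a + (c - b) = c - a by omega] at this
  exact this.symm

-- one outer-loop step peels exactly one run off B's mask
theorem colsFrom_cons (s : List Char) (i start e : Nat)
    (hInv : InvA s i) (hstart : start = skipA s i) (hi : i < s.length)
    (hsn : start < s.length) (he : e = consA s start) :
    colsFrom s i = ((start : Int), (e : Int)) :: colsFrom s e := by
  subst hstart he
  set start := skipA s i with hst
  set e := consA s start with hee
  have hins : i ≤ start := skipA_ge s i
  have hne : s.getD start ' ' ≠ ' ' := skipA_stop s i hsn
  have hTs : tokB s start = true := tokB_of_ne s start hne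
  have hse : start < e := consA_gt s start hsn hne
  have hen : e ≤ s.length := consA_le s start (by omega)
  have htok : ∀ k, start ≤ k → k < e → tokB s k = true := consA_tok s start hTs
  have hTe : e < s.length → tokB s e = false := fun h => by
    obtain ⟨h1, h2⟩ := consA_stop s start (by omega)
    exact tokB_false_of s e h1 h2
  have hnsk : ∀ k, i ≤ k → k < start → tokB s k = false := skipped_not_tok s i hInv
  -- run start at `start`
  have hrs : runstartB s start = true := by
    unfold runstartB
    rw [hTs]
    by_cases h0 : start = 0
    · simp [h0]
    · have : tokB s (start - 1) = false := by
        rcases Nat.eq_or_lt_of_le hins with heq | hlt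
        · -- start = i: invariant rules out i > 0 with s[i] ≠ ' '
          rcases hInv with rfl | h | ⟨h1, _⟩
          · omega
          · omega
          · rw [← heq] at hne; exact absurd h1 hne
        · exact hnsk (start - 1) (by omega) (by omega)
      simp [this]
  -- run end at `e - 1`
  have hre : runendB s (e - 1) = true := by
    unfold runendB
    rw [htok (e - 1) (by omega) (by omega)]
    by_cases hEn : e = s.length
    · simp [show e - 1 + 1 = s.length by omega]
    · have : tokB s (e - 1 + 1) = false := by
        rw [show e - 1 + 1 = e by omega]
        exact hTe (by omega)
      simp [this]
  -- split the ranges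
  have hsplitS : List.range' i (s.length - i) =
      List.range' i (start - i) ++ List.range' start (e - start) ++ List.range' e (s.length - e) := by
    rw [List.append_assoc, ← range'_split start e s.length (by omega) hen,
        ← range'_split i start s.length hins (by omega)]
  have hfilterNil1 : ∀ (p : Nat → Bool), (∀ k, i ≤ k → k < start → p k = false) →
      (List.range' i (start - i)).filter p = [] := by
    intro p hp
    rw [List.filter_eq_nil_iff]
    intro a ha
    rw [List.mem_range'_1] at ha
    simp [hp a ha.1 (by omega)]
  -- starts over [start, e) = [start]
  have hmidS : (List.range' start (e - start)).filter (runstartB s) = [start] := by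
    obtain ⟨m, hm⟩ : ∃ m, e - start = m + 1 := ⟨e - start - 1, by omega⟩
    rw [hm, List.range'_succ, List.filter_cons_of_pos hrs, List.filter_eq_nil_iff.mpr]
    intro a ha
    rw [List.mem_range'_1] at ha
    have : tokB s (a - 1) = true := htok (a - 1) (by omega) (by omega)
    simp [runstartB, this]
    omega
  -- ends over [start, e) = [e - 1]
  have hmidE : (List.range' start (e - start)).filter (runendB s) = [e - 1] := by
    have hsplit2 : List.range' start (e - start) =
        List.range' start (e - 1 - start) ++ List.range' (e - 1) 1 := by
      have := range'_split start (e - 1) e (by omega) (by omega)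
      rw [show e - (e - 1) = 1 by omega] at this
      rw [show List.range' start (e - start) = List.range' start (e - start) from rfl]
      rw [show e - start = e - start from rfl]
      exact this
    rw [hsplit2, List.filter_append]
    have h1 : (List.range' start (e - 1 - start)).filter (runendB s) = [] := by
      rw [List.filter_eq_nil_iff]
      intro a ha
      rw [List.mem_range'_1] at ha
      have : tokB s (a + 1) = true := htok (a + 1) (by omega) (by omega)
      simp [runendB, this]
      omega
    have h2 : (List.range' (e - 1) 1).filter (runendB s) = [e - 1] := by
      simp [List.range', List.filter, hre]
    rw [h1, h2]
    simp
  unfold colsFrom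
  rw [hsplitS, List.filter_append, List.filter_append, List.filter_append, List.filter_append,
      hfilterNil1 (runstartB s) (fun k h1 h2 => by simp [runstartB, hnsk k h1 h2]),
      hfilterNil1 (runendB s) (fun k h1 h2 => by simp [runendB, hnsk k h1 h2]),
      hmidS, hmidE]
  simp only [List.nil_append, List.map_cons, List.cons_append,
    List.zip_cons_cons, List.map_cons]
  rw [show e - 1 + 1 = e by omega]

-- the outer loop computes acc ++ (B's runs from position i)
theorem outer_spec (s : List Char) (i : Nat) (acc : List (Int × Int)) (hInv : InvA s i) :
    outerA s i acc = acc ++ colsFrom s i := by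
  rw [outerA]
  by_cases h : i < s.length
  · simp only [dif_pos h]
    by_cases h2 : s.length ≤ skipA s i
    · rw [dif_pos h2, colsFrom_nil s i (fun j hj hjn => skipA_spaces s i j hj (by omega))]
      simp
    · rw [dif_neg h2]
      have hsn : skipA s i < s.length := by omega
      have hne := skipA_stop s i hsn
      have hse : skipA s i < consA s (skipA s i) := consA_gt s (skipA s i) hsn hne
      have hInvE : InvA s (consA s (skipA s i)) := by
        by_cases hEn : consA s (skipA s i) < s.length
        · obtain ⟨h1, hh2⟩ := consA_stop s (skipA s i) hEn
          exact Or.inr (Or.inr ⟨h1, hh2⟩)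
        · exact Or.inr (Or.inl (by omega))
      rw [outer_spec s (consA s (skipA s i)) _ hInvE]
      rw [if_pos hse]
      rw [colsFrom_cons s i (skipA s i) (consA s (skipA s i)) hInv rfl h hsn rfl]
      simp
  · simp only [dif_neg h]
    rw [colsFrom_nil s i (by omega)]
    simp
termination_by s.length - i
decreasing_by
  have h1 := skipA_ge s i
  omega

-- bridge: B's port equals colsFrom at 0
theorem alt_eq_colsFrom (hl : String) :
    detect_column_boundaries_py_alt hl = colsFrom hl.toList 0 := by
  unfold detect_column_boundaries_py_alt colsFrom
  have hlen : hl.toList.length = hl.length := by simp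
  have hget : ∀ k, ((List.range hl.toList.length).map (fun i => tokB hl.toList i)).getD k false
      = tokB hl.toList k := by
    intro k
    by_cases hk : k < hl.toList.length
    · have hk2 : k < hl.length := by omega
      simp [List.getD_eq_getElem?_getD, hk2]
    · have hk2 : hl.length ≤ k := by omega
      rw [List.getD_eq_getElem?_getD]
      simp only [List.getElem?_map]
      rw [List.getElem?_eq_none (by simpa using hk2)]
      simp [tokB_of_ge hl.toList k (by omega)]
  have hstarts : (List.range hl.toList.length).filter
        (fun i => ((List.range hl.toList.length).map (fun i => tokB hl.toList i)).getD i false &&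
          (i == 0 || !(((List.range hl.toList.length).map (fun i => tokB hl.toList i)).getD (i - 1) false)))
      = (List.range' 0 (hl.toList.length - 0)).filter (runstartB hl.toList) := by
    rw [Nat.sub_zero, ← List.range_eq_range']
    apply List.filter_congr
    intro x _
    simp only [hget]
    rfl
  have hends : (List.range hl.toList.length).filter
        (fun i => ((List.range hl.toList.length).map (fun i => tokB hl.toList i)).getD i false &&
          (i == hl.toList.length - 1 || !(((List.range hl.toList.length).map (fun i => tokB hl.toList i)).getD (i + 1) false)))
      = (List.range' 0 (hl.toList.length - 0)).filter (runendB hl.toList) := by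
    rw [Nat.sub_zero, ← List.range_eq_range']
    apply List.filter_congr
    intro x hx
    rw [List.mem_range] at hx
    simp only [hget]
    unfold runendB
    congr 1
    have hb : (x == hl.toList.length - 1) = (x + 1 == hl.toList.length) := by
      by_cases hh : x + 1 = hl.toList.length
      · have hx1 : x = hl.toList.length - 1 := by omega
        simp [hx1]
        omega
      · have hx1 : x ≠ hl.toList.length - 1 := by omega
        simp [hh]
        omega
    rw [hb]
  simp only [hstarts, hends]

-- ===== VERDICT (by name: the statement is the Claim_ definition above) =====
theorem detect_column_boundaries_py_spec : Claim_equal_detect_column_boundaries_py := by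
  intro hl _
  unfold Spec_detect_column_boundaries_py detect_column_boundaries_py
  rw [alt_eq_colsFrom, outer_spec hl.toList 0 [] (Or.inl rfl)]
  simp
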